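-- pv_equiv track=rewrite | github.com/hechem20/backendmath | prim.py | divsio
-- ===== SOURCE A (Python) =====
-- def ind(u, ch, m):
--     i = m
--     k = 0
--     while (k == 0) and i < len(u):
--         if u[i] == ch:
--             k = 1
--         i = i + 1
--     if k == 1:
--         return i - 1
--     else:
--         return -1
--
-- def divsio(u):
--     i = ind(u, '/', 0)
--     k = 0
--     while i != -1 and k == 0:
--         c = i
--         if u[i] == '/' and u[:i].count(')') == u[:i].count('('):
--             k = 1
--         i = ind(u, '/', i + 1)
--     if k == 1:
--         return c
--     else:
--         return -1
-- ===== SOURCE B (Python) =====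
-- def divsio(u):
--     bal = 0
--     for i, c in enumerate(u):
--         if c == '/' and bal == 0:
--             return i
--         if c == '(':
--             bal += 1
--         elif c == ')':
--             bal -= 1
--     return -1
-- ===== Notes on version B (the rewrite author's own statement) =====
-- stated objective: faster
-- what changed: Replaces the repeated find-next-slash scans with quadratic prefix recounting of '(' and ')' by a single left-to-right pass that maintains a running parenthesis balance and returns at the first '/' seen with balance zero.
import Mathlib
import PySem

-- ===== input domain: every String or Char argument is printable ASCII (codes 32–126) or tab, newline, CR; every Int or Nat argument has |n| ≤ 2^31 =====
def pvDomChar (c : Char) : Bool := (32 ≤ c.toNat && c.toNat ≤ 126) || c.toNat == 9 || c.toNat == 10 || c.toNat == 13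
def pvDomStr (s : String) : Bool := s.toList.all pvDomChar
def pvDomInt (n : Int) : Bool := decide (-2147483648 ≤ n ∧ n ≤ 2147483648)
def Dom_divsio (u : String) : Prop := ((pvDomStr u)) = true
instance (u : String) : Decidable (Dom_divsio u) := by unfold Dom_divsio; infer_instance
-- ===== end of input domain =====

-- B replaces A's repeated slash scans with quadratic prefix recounting by one
-- left-to-right pass maintaining a running parenthesis balance (objective: faster).


-- ===== PORT A =====
-- 'ind': the while loop 'while (k == 0) and i < len(u)'; the flag k is folded
-- into the control flow (k becomes 1 exactly when u[i] == ch, and then i-1 = this i).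
def indA (u : List Char) (ch : Char) (i : Nat) : Int :=
  if h : i < u.length then
    if u[i] = ch then (i : Int) else indA u ch (i + 1)
  else -1
termination_by u.length - i

-- range facts about indA, needed by divLoopA's termination proof
theorem indA_range (u : List Char) (ch : Char) (j : Nat)
    (h : indA u ch j ≠ -1) : j ≤ (indA u ch j).toNat ∧ (indA u ch j).toNat < u.length := by
  induction' hk : u.length - j with n ih generalizing j
  · rw [indA] at h ⊢
    split at h
    · omega
    · simp at h
  · rw [indA] at h ⊢
    split at h <;> rename_i hlt
    · rw [dif_pos hlt]
      split at h <;> rename_i hch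
      · rw [if_pos hch]
        simp only [Int.toNat_natCast]
        omega
      · rw [if_neg hch]
        have := ih (j + 1) h (by omega)
        omega
    · simp at h

-- divsio's while loop: i ranges over the successive slash positions found by ind;
-- the flag k and the cell c are folded into the control flow (return i on success).
def divLoopA (u : List Char) (j : Nat) : Int :=
  let i := indA u '/' j
  if i = -1 then -1
  else if PySem.List.pyGet? u i = some '/' ∧
          (u.take i.toNat).count ')' = (u.take i.toNat).count '(' then i
  else divLoopA u (i.toNat + 1)
termination_by u.length - j
decreasing_by
  have := indA_range u '/' j (by assumption)
  omega

def divsio (u : String) : Int := divLoopA u.toList 0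

-- ===== PORT B =====
-- single pass, running balance bal = #'(' - #')' seen so far
def altGo : List Char → Nat → Int → Int
  | [], _, _ => -1
  | c :: rest, i, bal =>
    if c = '/' ∧ bal = 0 then (i : Int)
    else altGo rest (i + 1) (if c = '(' then bal + 1 else if c = ')' then bal - 1 else bal)

def divsio_alt (u : String) : Int := altGo u.toList 0 0

-- ===== PRECONDITION & SPEC =====
def Spec_divsio (u : String) (out : Int) : Prop := out = divsio_alt u
instance (u : String) (out : Int) : Decidable (Spec_divsio u out) := by unfold Spec_divsio; infer_instance

-- ===== CLAIM (what is proved, stated in full; the proofs are below) =====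
def Claim_equal_divsio : Prop := ∀ (u : String), Dom_divsio u → Spec_divsio u (divsio u)

-- ===== LEMMAS AND PROOFS =====
theorem indA_found (u : List Char) (ch : Char) (j : Nat) (h : j < u.length)
    (hc : u[j] = ch) : indA u ch j = (j : Int) := by
  rw [indA]; simp [h, hc]

theorem indA_step (u : List Char) (ch : Char) (j : Nat) (h : j < u.length)
    (hc : u[j] ≠ ch) : indA u ch j = indA u ch (j + 1) := by
  rw [indA]; simp [h, hc]

theorem indA_end (u : List Char) (ch : Char) (j : Nat) (h : ¬ j < u.length) :
    indA u ch j = -1 := by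
  rw [indA]; simp [h]

-- the key invariant: A's loop from search start j equals B's scan of the suffix
-- from j carried with the balance of the prefix before j
theorem main_inv (u : List Char) (j : Nat) (hj : j ≤ u.length) :
    divLoopA u j =
      altGo (u.drop j) j (((u.take j).count '(' : Int) - ((u.take j).count ')' : Int)) := by
  induction' hk : u.length - j with n ih generalizing j
  · have hje : j = u.length := by omega
    subst hje
    have h1 : indA u '/' u.length = -1 := indA_end u '/' u.length (by omega)
    rw [divLoopA]
    rw [List.drop_length]
    simp only [h1, altGo]
    norm_num
  · have hlt : j < u.length := by omega
    have hdrop : u.drop j = u[j] :: u.drop (j + 1) := List.drop_eq_getElem_cons hlt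
    have htake : u.take (j + 1) = u.take j ++ [u[j]] := by
      rw [List.take_add_one, List.getElem?_eq_getElem hlt]; rfl
    by_cases hc : u[j] = '/'
    · have hind : indA u '/' j = (j : Int) := indA_found u '/' j hlt hc
      rw [divLoopA]
      simp only [hind]
      have hget : PySem.List.pyGet? u (j : Int) = some '/' := by
        simp [PySem.List.pyGet?_natCast, List.getElem?_eq_getElem hlt, hc]
      by_cases hbal : (u.take j).count ')' = (u.take j).count '('
      · rw [if_neg (by omega), if_pos ⟨hget, by simpa using hbal⟩]
        rw [hdrop, altGo]
        rw [if_pos ⟨hc, by omega⟩]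
      · rw [if_neg (by omega), if_neg (by simp [hbal])]
        simp only [Int.toNat_natCast]
        rw [ih (j + 1) (by omega) (by omega)]
        rw [hdrop, altGo, if_neg (by push Not; intro _; omega)]
        have hnp1 : u[j] ≠ '(' := by rw [hc]; decide
        have hnp2 : u[j] ≠ ')' := by rw [hc]; decide
        simp [htake, List.count_append, hc]
    · have hind : indA u '/' j = indA u '/' (j + 1) := indA_step u '/' j hlt hc
      rw [divLoopA]
      simp only [hind]
      rw [← divLoopA]
      rw [ih (j + 1) (by omega) (by omega)]
      rw [hdrop, altGo, if_neg (by push Not; intro h'; exact absurd h' hc)]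
      congr 1
      simp only [htake, List.count_append]
      by_cases h1 : u[j] = '('
      · have h1' : u[j] ≠ ')' := by rw [h1]; decide
        simp [h1]; ring
      · by_cases h2 : u[j] = ')'
        · simp [h2]; ring
        · simp [h1, h2]

-- ===== VERDICT (by name: the statement is the Claim_ definition above) =====
theorem divsio_spec : Claim_equal_divsio := by
  intro u _
  unfold Spec_divsio divsio divsio_alt
  simpa using main_inv u.toList 0 (by omega)
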